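-- pv_equiv track=rewrite | github.com/bhavya2521/Problem-Solving | Codeforces/A/271A.py | check
-- ===== SOURCE A (Python) =====
-- def check(n):
--     l=[]
--     s=str(n)
--     for i in range(4):
--         if(s[i] in l):
--             return False
--         l.append(s[i])
--     return True
-- ===== SOURCE B (Python) =====
-- def check(n):
--     s = str(n)
--     t = sorted([s[0], s[1], s[2], s[3]])
--     return t[0] != t[1] and t[1] != t[2] and t[2] != t[3]
-- ===== Notes on version B (the rewrite author's own statement) =====
-- stated objective: alternative
-- what changed: Replaces the seen-list membership loop with early exit by sorting the four characters and checking that no two adjacent sorted characters are equal.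
-- outside the precondition, e.g. on check(4): A raises IndexError, B raises IndexError; on check(11): A returns False, B raises IndexError; on check(123): A raises IndexError, B raises IndexError
import Mathlib
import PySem

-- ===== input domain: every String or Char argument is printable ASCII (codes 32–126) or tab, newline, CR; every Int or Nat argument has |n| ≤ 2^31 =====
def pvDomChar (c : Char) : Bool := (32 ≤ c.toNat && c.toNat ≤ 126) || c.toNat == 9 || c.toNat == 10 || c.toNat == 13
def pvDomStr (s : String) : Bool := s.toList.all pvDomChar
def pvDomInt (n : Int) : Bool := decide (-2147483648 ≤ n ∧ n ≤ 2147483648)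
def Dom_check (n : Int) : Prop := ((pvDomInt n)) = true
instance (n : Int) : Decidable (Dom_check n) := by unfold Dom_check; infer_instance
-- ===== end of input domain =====

-- B replaces A's seen-list membership loop by sorting the four characters and testing adjacent inequality (alternative algorithm, same cost).

-- ===== PORT A =====
-- for i in range(4): if s[i] in l: return False; l.append(s[i]); return True
def checkLoop (s : String) (is : List Int) (l : List Char) : Bool :=
  match is with
  | [] => true
  | i :: rest =>
    match PySem.Str.pyGet? s i with
    | none => false   -- s[i] raises IndexError here; outside Pre_check
    | some c => if l.contains c then false else checkLoop s rest (l ++ [c])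

def check (n : Int) : Bool :=
  let s := PySem.Int.toStr n
  checkLoop s (PySem.List.pyRange 0 4 1) []

-- ===== PORT B =====
-- t = sorted([s[0], s[1], s[2], s[3]]); return t[0] != t[1] and t[1] != t[2] and t[2] != t[3]
def check_alt (n : Int) : Bool :=
  let s := PySem.Int.toStr n
  match PySem.Str.pyGet? s 0, PySem.Str.pyGet? s 1, PySem.Str.pyGet? s 2, PySem.Str.pyGet? s 3 with
  | some a, some b, some c, some d =>
      let t := PySem.List.sorted [a, b, c, d] (fun x => x) false
      match PySem.List.pyGet? t 0, PySem.List.pyGet? t 1, PySem.List.pyGet? t 2, PySem.List.pyGet? t 3 with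
      | some p, some q, some r, some u => p != q && (q != r && r != u)
      | _, _, _, _ => false   -- unreachable: t has 4 elements
  | _, _, _, _ => false   -- an s[i] raises IndexError here; outside Pre_check

-- ===== PRECONDITION & SPEC =====
-- Pre_ excludes inputs whose str(n) has fewer than 4 characters: there B always raises IndexError, and A
-- either raises IndexError too (e.g. 123) or returns False only because a duplicate appears before the
-- out-of-range index (e.g. 11), an artefact of its early exit.
def Pre_check (n : Int) : Prop := 4 ≤ (PySem.Int.toChars n).length
instance (n : Int) : Decidable (Pre_check n) := by unfold Pre_check; infer_instance
def pvWitness_check : Int := (1234)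
def Spec_check (n : Int) (out : Bool) : Prop := out = check_alt n
instance (n : Int) (out : Bool) : Decidable (Spec_check n out) := by unfold Spec_check; infer_instance

-- ===== CLAIM (what is proved, stated in full; the proofs are below) =====
def Claim_equal_check : Prop := ∀ (n : Int), Dom_check n → Pre_check n → Spec_check n (check n)

-- ===== LEMMAS AND PROOFS =====

-- A's if-chain over the four characters decides their pairwise distinctness
theorem keyA (a b c d : Char) :
    (if [a].contains b then false
     else if [a, b].contains c then false
     else if [a, b, c].contains d then false else true)
      = decide ([a, b, c, d].Nodup) := by
  by_cases hab : a = b <;> by_cases hac : a = c <;> by_cases had : a = d <;>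
    by_cases hbc : b = c <;> by_cases hbd : b = d <;> by_cases hcd : c = d <;>
    subst_vars <;> simp_all <;>
    exact ⟨fun h => hab h.symm, ⟨fun h => hac h.symm, fun h => hbc h.symm⟩,
           fun h => had h.symm, fun h => hbd h.symm, fun h => hcd h.symm⟩

-- B's sorted-adjacent test also decides pairwise distinctness of the four characters
theorem keyB (a b c d p q r u : Char)
    (ht : PySem.List.sorted [a, b, c, d] (fun x => x) false = [p, q, r, u]) :
    (p != q && (q != r && r != u)) = decide ([a, b, c, d].Nodup) := by
  have hperm : [p, q, r, u].Perm [a, b, c, d] := ht ▸ PySem.List.sorted_perm ..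
  have hpw : [p, q, r, u].Pairwise (fun x y => x ≤ y) := by
    have := PySem.List.sorted_pairwise (xs := [a, b, c, d]) (key := fun x => x)
    rw [ht] at this; exact this
  simp only [List.pairwise_cons, List.mem_cons] at hpw
  have hiff : (p ≠ q ∧ q ≠ r ∧ r ≠ u) ↔ [a, b, c, d].Nodup := by
    constructor
    · rintro ⟨h1, h2, h3⟩
      have hpq : p < q := lt_of_le_of_ne (by simp_all) h1
      have hqr : q < r := lt_of_le_of_ne (by simp_all) h2
      have hru : r < u := lt_of_le_of_ne (by simp_all) h3
      refine hperm.nodup_iff.mp ?_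
      have : [p, q, r, u].Pairwise (· < ·) := by
        simp [List.pairwise_cons]
        refine ⟨⟨hpq, lt_trans hpq hqr, lt_trans (lt_trans hpq hqr) hru⟩,
                ⟨hqr, lt_trans hqr hru⟩, hru⟩
      exact this.imp ne_of_lt
    · intro h
      have ht4 : [p, q, r, u].Nodup := hperm.nodup_iff.mpr h
      simp [List.nodup_cons] at ht4
      tauto
  rw [Bool.eq_iff_iff]
  simp only [Bool.and_eq_true, bne_iff_ne, decide_eq_true_iff]
  constructor
  · rintro ⟨h1, h2, h3⟩; exact hiff.mp ⟨h1, h2, h3⟩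
  · intro h; obtain ⟨h1, h2, h3⟩ := hiff.mpr h; exact ⟨h1, h2, h3⟩

-- ===== VERDICT (by name: the statement is the Claim_ definition above) =====
theorem check_spec : Claim_equal_check := by
  intro n _ hpre
  unfold Spec_check check check_alt
  obtain ⟨a, t1, h1⟩ : ∃ a t, PySem.Int.toChars n = a :: t := by
    cases h : PySem.Int.toChars n with
    | nil => simp [Pre_check, h] at hpre
    | cons a t => exact ⟨a, t, rfl⟩
  obtain ⟨b, t2, h2⟩ : ∃ b t, t1 = b :: t := by
    cases h : t1 with
    | nil => simp [Pre_check, h1, h] at hpre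
    | cons b t => exact ⟨b, t, rfl⟩
  obtain ⟨c, t3, h3⟩ : ∃ c t, t2 = c :: t := by
    cases h : t2 with
    | nil => simp [Pre_check, h1, h2, h] at hpre
    | cons c t => exact ⟨c, t, rfl⟩
  obtain ⟨d, t4, h4⟩ : ∃ d t, t3 = d :: t := by
    cases h : t3 with
    | nil => simp [Pre_check, h1, h2, h3, h] at hpre
    | cons d t => exact ⟨d, t, rfl⟩
  have hs : (PySem.Int.toStr n).toList = a :: b :: c :: d :: t4 := by
    rw [PySem.Int.toList_toStr, h1, h2, h3, h4]
  have hr : PySem.List.pyRange 0 4 1 = [(0 : Int), 1, 2, 3] := by decide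
  have e0 : PySem.Chars.pyGet? (a :: b :: c :: d :: t4) (0 : Int) = some a := by
    simp [PySem.Chars.pyGet?]
  have e1 : PySem.Chars.pyGet? (a :: b :: c :: d :: t4) (1 : Int) = some b := by
    simp only [PySem.Chars.pyGet?]
    simpa using PySem.List.pyGet?_ofNat (xs := a :: b :: c :: d :: t4) (n := 1) (by simp [List.length_cons])
  have e2 : PySem.Chars.pyGet? (a :: b :: c :: d :: t4) (2 : Int) = some c := by
    simp only [PySem.Chars.pyGet?]
    simpa using PySem.List.pyGet?_ofNat (xs := a :: b :: c :: d :: t4) (n := 2) (by simp [List.length_cons])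
  have e3 : PySem.Chars.pyGet? (a :: b :: c :: d :: t4) (3 : Int) = some d := by
    simp only [PySem.Chars.pyGet?]
    simpa using PySem.List.pyGet?_ofNat (xs := a :: b :: c :: d :: t4) (n := 3) (by simp [List.length_cons])
  obtain ⟨p, q, r, u, ht⟩ :
      ∃ p q r u, PySem.List.sorted [a, b, c, d] (fun x => x) false = [p, q, r, u] := by
    have hlen : (PySem.List.sorted [a, b, c, d] (fun x => x) false).length = 4 :=
      (PySem.List.sorted_perm ..).length_eq
    match hx : PySem.List.sorted [a, b, c, d] (fun x => x) false, hlen with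
    | [p, q, r, u], _ => exact ⟨p, q, r, u, rfl⟩
  have f0 : PySem.List.pyGet? [p, q, r, u] (0 : Int) = some p := by
    simpa using PySem.List.pyGet?_ofNat (xs := [p, q, r, u]) (n := 0) (by simp)
  have f1 : PySem.List.pyGet? [p, q, r, u] (1 : Int) = some q := by
    simpa using PySem.List.pyGet?_ofNat (xs := [p, q, r, u]) (n := 1) (by simp)
  have f2 : PySem.List.pyGet? [p, q, r, u] (2 : Int) = some r := by
    simpa using PySem.List.pyGet?_ofNat (xs := [p, q, r, u]) (n := 2) (by simp)
  have f3 : PySem.List.pyGet? [p, q, r, u] (3 : Int) = some u := by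
    simpa using PySem.List.pyGet?_ofNat (xs := [p, q, r, u]) (n := 3) (by simp)
  simp only [hr, checkLoop, PySem.Str.pyGet?, hs, e0, e1, e2, e3, ht, f0, f1, f2, f3,
    List.nil_append, List.cons_append, List.contains_nil,
    Bool.false_eq_true, if_false]
  rw [keyA a b c d, keyB a b c d p q r u ht]
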